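-- pv_equiv track=rewrite | github.com/blegloannec/CodeProblems | CodinGame/Community/chemical_equation_balancing.py | parse_mol
-- ===== SOURCE A (Python) =====
-- def parse_mol(S):
--     n = len(S)
--     M = {}
--     i = 0
--     while i<n:
--         A = S[i]
--         i += 1
--         if i<n and 'a'<=S[i]<='z':
--             A += S[i]
--             i += 1
--         m = 0
--         while i<n and '0'<=S[i]<='9':
--             m = 10*m + ord(S[i])-ord('0')
--             i += 1
--         if m==0:
--             m = 1
--         M[A] = m
--     return M
-- ===== SOURCE B (Python) =====
-- def parse_mol(S):
--     # single left-to-right fold over the characters with a pending-token accumulator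
--     M = {}
--     sym = None   # pending token's symbol (None = no pending token)
--     cnt = 0      # pending token's digit accumulator
--     fresh = False  # True iff sym is exactly one char just read (a lowercase may still extend it)
--     for c in S:
--         if sym is not None and fresh and 'a' <= c <= 'z':
--             sym += c
--             fresh = False
--         elif sym is not None and '0' <= c <= '9':
--             cnt = 10 * cnt + ord(c) - 48
--             fresh = False
--         else:
--             if sym is not None:
--                 M[sym] = cnt if cnt else 1
--             sym, cnt, fresh = c, 0, True
--     if sym is not None:
--         M[sym] = cnt if cnt else 1
--     return M
-- ===== Notes on version B (the rewrite author's own statement) =====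
-- stated objective: alternative
-- what changed: A's index-advancing outer while with two nested inner scans (lowercase absorb, digit run) is replaced by a single flat fold over the characters carrying a pending (symbol, count, fresh) accumulator that emits a dict entry at each token boundary.
import Mathlib
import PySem

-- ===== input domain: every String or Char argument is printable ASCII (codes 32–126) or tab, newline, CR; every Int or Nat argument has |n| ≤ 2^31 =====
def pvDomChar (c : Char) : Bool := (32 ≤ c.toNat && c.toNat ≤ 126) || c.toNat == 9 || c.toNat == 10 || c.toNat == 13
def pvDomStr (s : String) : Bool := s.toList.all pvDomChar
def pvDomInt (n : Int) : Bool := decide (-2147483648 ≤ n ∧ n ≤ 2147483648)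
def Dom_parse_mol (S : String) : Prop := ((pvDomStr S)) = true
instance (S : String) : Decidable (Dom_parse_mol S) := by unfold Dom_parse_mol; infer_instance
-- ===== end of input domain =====

-- ===== PORT A =====
-- B replaces A's index-advancing nested while loops by a single character fold
-- with a pending-token accumulator (objective: alternative decomposition, same cost).

-- inner digit loop of A: consumes leading digits, returns (m, rest)
def pvDigits (l : List Char) (m : Int) : Int × List Char :=
  match l with
  | [] => (m, [])
  | c :: rest =>
    if '0' ≤ c ∧ c ≤ '9' then pvDigits rest (10 * m + ((c.toNat : Int) - 48))
    else (m, c :: rest)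

theorem pvDigits_len (l : List Char) (m : Int) : (pvDigits l m).2.length ≤ l.length := by
  induction l generalizing m with
  | nil => simp [pvDigits]
  | cons c rest ih =>
    simp only [pvDigits]
    split
    · exact Nat.le_succ_of_le (ih _)
    · simp

-- A's outer while: position i becomes the remaining suffix of characters
def pvLoopA (l : List Char) (M : PySem.Dict String Int) : PySem.Dict String Int :=
  match l with
  | [] => M
  | c :: rest =>
    -- A = S[i]; optional following lowercase
    let p : List Char × List Char :=
      match rest with
      | d :: rest' => if 'a' ≤ d ∧ d ≤ 'z' then ([c, d], rest') else ([c], d :: rest')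
      | [] => ([c], [])
    let q := pvDigits p.2 0
    let m := if q.1 = 0 then 1 else q.1
    pvLoopA q.2 (M.insert (String.ofList p.1) m)
termination_by l.length
decreasing_by
  have h1 : p.2.length ≤ rest.length := by
    simp only [p]
    match rest with
    | [] => simp
    | d :: rest' =>
      dsimp only
      split <;> simp
  have := pvDigits_len p.2 0
  show (pvDigits p.2 0).2.length < (c :: rest).length
  simp only [List.length_cons]
  omega

def parse_mol (S : String) : List (String × Int) :=
  (pvLoopA S.toList PySem.Dict.empty).items

-- ===== PORT B =====
-- state of Source B's fold: (M, sym, cnt, fresh); sym is the pending symbol's chars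
-- (Source B builds it as a string by '+='; kept as List Char and turned into a String
-- exactly at insertion time — exact, a Python str is its list of chars)
def pvStepB (st : PySem.Dict String Int × Option (List Char) × Int × Bool) (c : Char) :
    PySem.Dict String Int × Option (List Char) × Int × Bool :=
  match st with
  | (M, some s, cnt, fresh) =>
    if fresh ∧ 'a' ≤ c ∧ c ≤ 'z' then (M, some (s ++ [c]), cnt, false)
    else if '0' ≤ c ∧ c ≤ '9' then (M, some s, 10 * cnt + ((c.toNat : Int) - 48), false)
    else (M.insert (String.ofList s) (if cnt = 0 then 1 else cnt), some [c], 0, true)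
  | (M, none, _, _) => (M, some [c], 0, true)

-- final 'if sym is not None: M[sym] = cnt if cnt else 1'
def pvFinishB (st : PySem.Dict String Int × Option (List Char) × Int × Bool) :
    PySem.Dict String Int :=
  match st with
  | (M, some s, cnt, _) => M.insert (String.ofList s) (if cnt = 0 then 1 else cnt)
  | (M, none, _, _) => M

def parse_mol_alt (S : String) : List (String × Int) :=
  (pvFinishB (S.toList.foldl pvStepB (PySem.Dict.empty, none, 0, false))).items

-- ===== PRECONDITION & SPEC =====
def Spec_parse_mol (S : String) (out : List (String × Int)) : Prop := out = parse_mol_alt S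
instance (S : String) (out : List (String × Int)) : Decidable (Spec_parse_mol S out) := by unfold Spec_parse_mol; infer_instance

-- ===== CLAIM (what is proved, stated in full; the proofs are below) =====
def Claim_equal_parse_mol : Prop := ∀ (S : String), Dom_parse_mol S → Spec_parse_mol S (parse_mol S)

-- ===== LEMMAS AND PROOFS =====

theorem pvLoopA_nil (M : PySem.Dict String Int) : pvLoopA [] M = M := by
  unfold pvLoopA; rfl

theorem pvLoopA_single (c : Char) (M : PySem.Dict String Int) :
    pvLoopA [c] M = M.insert (String.ofList [c]) 1 := by
  unfold pvLoopA; simp [pvDigits]; unfold pvLoopA; rfl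

theorem pvLoopA_low (c d : Char) (rest' : List Char) (M : PySem.Dict String Int)
    (hlow : 'a' ≤ d ∧ d ≤ 'z') :
    pvLoopA (c :: d :: rest') M =
      pvLoopA (pvDigits rest' 0).2
        (M.insert (String.ofList [c, d])
          (if (pvDigits rest' 0).1 = 0 then 1 else (pvDigits rest' 0).1)) := by
  conv_lhs => unfold pvLoopA
  simp [hlow]

theorem pvLoopA_nolow (c d : Char) (rest' : List Char) (M : PySem.Dict String Int)
    (hlow : ¬('a' ≤ d ∧ d ≤ 'z')) :
    pvLoopA (c :: d :: rest') M =
      pvLoopA (pvDigits (d :: rest') 0).2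
        (M.insert (String.ofList [c])
          (if (pvDigits (d :: rest') 0).1 = 0 then 1 else (pvDigits (d :: rest') 0).1)) := by
  conv_lhs => unfold pvLoopA
  simp [hlow]

-- folding B from digit-mode (fresh = false) is A's digit loop followed by the
-- insertion of the pending token and a restart with no pending token
theorem pvDigitRun (l : List Char) (s : List Char) (m : Int) (M : PySem.Dict String Int) :
    pvFinishB (l.foldl pvStepB (M, some s, m, false)) =
    pvFinishB ((pvDigits l m).2.foldl pvStepB
      (M.insert (String.ofList s) (if (pvDigits l m).1 = 0 then 1 else (pvDigits l m).1), none, 0, false)) := by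
  induction l generalizing m with
  | nil => simp [pvDigits, List.foldl, pvFinishB]
  | cons c rest ih =>
    by_cases hd : '0' ≤ c ∧ c ≤ '9'
    · simp only [pvDigits, List.foldl, pvStepB, hd, and_true]
      simp only [Bool.false_eq_true, false_and, if_false, if_true]
      exact ih _
    · simp only [pvDigits, hd, if_false, List.foldl]
      simp only [pvStepB, Bool.false_eq_true, false_and, if_false, hd]

-- the main invariant: A's loop equals B's fold started with no pending token
theorem pvMain : ∀ (n : Nat) (l : List Char), l.length ≤ n → ∀ (M : PySem.Dict String Int),
    pvLoopA l M = pvFinishB (l.foldl pvStepB (M, none, 0, false)) := by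
  intro n
  induction n with
  | zero =>
    intro l hl M
    match l with
    | [] => simp [pvLoopA_nil, List.foldl, pvFinishB]
    | _ :: _ => simp at hl
  | succ n ih =>
    intro l hl M
    match l with
    | [] => simp [pvLoopA_nil, List.foldl, pvFinishB]
    | c :: rest =>
      simp only [List.foldl, pvStepB]
      match rest with
      | [] =>
        simp [pvLoopA_single, List.foldl, pvFinishB]
      | d :: rest' =>
        by_cases hlow : 'a' ≤ d ∧ d ≤ 'z'
        · -- lowercase absorbed into the symbol
          simp only [List.foldl]
          simp only [pvStepB, hlow, and_true, if_true]
          rw [pvLoopA_low c d rest' M hlow, pvDigitRun]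
          have hlen : (pvDigits rest' 0).2.length ≤ n := by
            have := pvDigits_len rest' 0
            simp at hl; omega
          rw [ih _ hlen]
          norm_num
        · by_cases hd : '0' ≤ d ∧ d ≤ '9'
          · -- digit right after the first symbol char
            simp only [List.foldl]
            simp only [pvStepB, hlow, hd, and_true, and_false, if_true, if_false]
            rw [pvLoopA_nolow c d rest' M hlow, pvDigitRun]
            have hlen : (pvDigits rest' (10 * 0 + ((d.toNat : Int) - 48))).2.length ≤ n := by
              have := pvDigits_len rest' (10 * 0 + ((d.toNat : Int) - 48))
              simp at hl; omega
            have hdig : pvDigits (d :: rest') 0 = pvDigits rest' (10 * 0 + ((d.toNat : Int) - 48)) := by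
              simp [pvDigits, hd]
            rw [hdig, ih _ hlen]
          · -- neither: d starts a new token
            simp only [List.foldl]
            simp only [pvStepB, hlow, hd, and_false, if_true, if_false]
            rw [pvLoopA_nolow c d rest' M hlow]
            have hdig : pvDigits (d :: rest') 0 = (0, d :: rest') := by
              simp [pvDigits, hd]
            rw [hdig]
            have hlen : (d :: rest').length ≤ n := by simp at hl ⊢; omega
            rw [ih _ hlen]
            simp only [List.foldl, pvStepB]
            norm_num [hlow, hd]

-- ===== VERDICT (by name: the statement is the Claim_ definition above) =====
theorem parse_mol_spec : Claim_equal_parse_mol := by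
  intro S _
  unfold Spec_parse_mol parse_mol parse_mol_alt
  rw [pvMain S.toList.length S.toList (Nat.le_refl _)]
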